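-- pv_equiv track=rewrite | github.com/Jackmrzhou/codewars | python/ascii85.py | toAscii85
-- ===== SOURCE A (Python) =====
-- def toAscii85(data):
-- 	result = []
-- 	stack = []
-- 	for i in range(0,len(data),4):
-- 		block = data[i:i+4]
-- 		temp = 4-len(block)
-- 		if temp != 0:
-- 			block += '\0' * temp
-- 		num = ord(block[0])*2**24 + ord(block[1])*2**16 + ord(block[2])*2**8 + ord(block[3])
-- 		if num==0 and temp == 0:
-- 			result.append('z')
-- 			continue
-- 		for _ in range(5):
-- 			stack.append(chr(num%85+33))
-- 			num //= 85
-- 		while temp <= 4: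
-- 			result.append(stack.pop())
-- 			temp += 1
-- 	return '<~'+''.join(result)+'~>'
-- ===== SOURCE B (Python) =====
-- def _enc(num, k):
--     s = ''
--     for p in range(4, -1, -1):
--         s += chr((num // 85**p) % 85 + 33)
--     return s[:k]
--
-- def toAscii85(data):
--     parts = ['<~']
--     buf = 0
--     cnt = 0
--     for ch in data:
--         buf = buf * 256 + ord(ch)
--         cnt += 1
--         if cnt == 4:
--             parts.append('z' if buf == 0 else _enc(buf, 5))
--             buf = 0
--             cnt = 0
--     if cnt != 0:
--         buf *= 256 ** (4 - cnt)
--         parts.append(_enc(buf, cnt + 1))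
--     parts.append('~>')
--     return ''.join(parts)
-- ===== Notes on version B (the rewrite author's own statement) =====
-- stated objective: alternative
-- what changed: B abandons A's index-range loop with 4-wide slices, the '\0' string padding and the shared push/pop stack: it streams the input one character at a time into a 32-bit accumulator with a byte counter, emits a 5-digit group (or 'z') whenever the counter reaches 4, and handles the final partial group by shifting the accumulator and taking a digit prefix, with the digits computed most-significant-first by a helper.
import Mathlib
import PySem

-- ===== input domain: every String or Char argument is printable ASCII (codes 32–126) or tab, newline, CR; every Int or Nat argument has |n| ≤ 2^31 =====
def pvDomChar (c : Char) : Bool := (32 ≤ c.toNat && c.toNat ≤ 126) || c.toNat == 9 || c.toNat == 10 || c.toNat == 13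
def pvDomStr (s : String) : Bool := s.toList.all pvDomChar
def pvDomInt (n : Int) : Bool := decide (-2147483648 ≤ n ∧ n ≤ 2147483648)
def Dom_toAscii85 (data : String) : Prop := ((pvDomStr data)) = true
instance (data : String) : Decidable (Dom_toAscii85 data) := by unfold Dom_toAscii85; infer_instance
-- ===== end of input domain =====

-- B streams the input byte by byte into a (buf, cnt) accumulator and emits each group when
-- cnt reaches 4, instead of A's index-range loop with slices, '\0' padding and a push/pop stack.

-- ===== PORT A =====
-- for _ in range(5): stack.append(chr(num%85+33)); num //= 85
def pvA_push : Nat → Int → List Char → Int × List Char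
  | 0, num, stack => (num, stack)
  | k+1, num, stack =>
      pvA_push k (PySem.Int.floordiv num 85)
        (stack ++ [Char.ofNat ((PySem.Int.mod num 85 + 33).toNat)])

-- while temp <= 4: result.append(stack.pop()); temp += 1
-- temp rises by 1 each pass, so the loop runs exactly (5 - temp).toNat times (the caller's count).
-- The 'none' branch is Python's IndexError on stack.pop(); unreachable — the stack holds enough digits.
def pvA_popAux : Nat → List Char → List Char → List Char × List Char
  | 0, result, stack => (result, stack)
  | n+1, result, stack =>
      match stack.getLast? with
      | some c => pvA_popAux n (result ++ [c]) stack.dropLast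
      | none => (result, stack)

-- one pass of the body of 'for i in range(0, len(data), 4)'; state = (result, stack)
def pvA_step (data : List Char) (st : List Char × List Char) (i : Int) : List Char × List Char :=
  let block := PySem.List.slice data (some i) (some (i + 4))
  let temp : Int := 4 - block.length
  let block := if temp ≠ 0 then block ++ List.replicate temp.toNat (Char.ofNat 0) else block
  -- block[0..3]; block has length 4 here, getD is only a totality guard
  let num : Int := ((block.getD 0 (Char.ofNat 0)).toNat : Int) * 2 ^ 24
    + ((block.getD 1 (Char.ofNat 0)).toNat : Int) * 2 ^ 16
    + ((block.getD 2 (Char.ofNat 0)).toNat : Int) * 2 ^ 8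
    + ((block.getD 3 (Char.ofNat 0)).toNat : Int)
  if num = 0 ∧ temp = 0 then (st.1 ++ ['z'], st.2)
  else
    let ns := pvA_push 5 num st.2
    pvA_popAux (5 - temp).toNat st.1 ns.2

def toAscii85 (data : String) : String :=
  "<~" ++ String.ofList
    (((PySem.List.pyRange 0 (data.toList.length : Int) 4).foldl
        (pvA_step data.toList) ([], [])).1) ++ "~>"

-- ===== PORT B =====
-- def _enc(num, k): s = ''; for p in range(4,-1,-1): s += chr((num // 85**p) % 85 + 33); return s[:k]
def pvB_encS (num : Int) : List Char :=
  (PySem.List.pyRange 4 (-1) (-1)).foldl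
    (fun s p => s ++ [Char.ofNat ((PySem.Int.mod (PySem.Int.floordiv num (85 ^ p.toNat)) 85 + 33).toNat)]) []

def pvB_enc (num : Int) (k : Nat) : List Char := (pvB_encS num).take k

-- body of 'for ch in data'; state = (parts flattened to chars, buf, cnt)
def pvB_step (st : List Char × Int × Nat) (c : Char) : List Char × Int × Nat :=
  let buf := st.2.1 * 256 + (c.toNat : Int)
  let cnt := st.2.2 + 1
  if cnt = 4 then
    (st.1 ++ (if buf = 0 then ['z'] else pvB_enc buf 5), 0, 0)
  else (st.1, buf, cnt)

def toAscii85_alt (data : String) : String :=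
  let st := data.toList.foldl pvB_step ([], 0, 0)
  let out := if st.2.2 ≠ 0 then st.1 ++ pvB_enc (st.2.1 * 256 ^ (4 - st.2.2)) (st.2.2 + 1) else st.1
  "<~" ++ String.ofList out ++ "~>"

-- ===== PRECONDITION & SPEC =====
def Spec_toAscii85 (data : String) (out : String) : Prop := out = toAscii85_alt data
instance (data : String) (out : String) : Decidable (Spec_toAscii85 data out) := by unfold Spec_toAscii85; infer_instance

-- ===== CLAIM (what is proved, stated in full; the proofs are below) =====
def Claim_equal_toAscii85 : Prop := ∀ (data : String), Dom_toAscii85 data → Spec_toAscii85 data (toAscii85 data)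

-- ===== LEMMAS AND PROOFS =====

-- digit k of num (least-significant-first)
def pvDig (num : Int) (k : Nat) : Char :=
  Char.ofNat ((PySem.Int.mod (PySem.Int.floordiv num (85 ^ k)) 85 + 33).toNat)

theorem pv_fd_step (a : Int) (k : Nat) :
    PySem.Int.floordiv (PySem.Int.floordiv a (85 ^ k)) 85 = PySem.Int.floordiv a (85 ^ (k + 1)) := by
  rw [PySem.Int.floordiv_eq_ediv_of_pos (by positivity),
    PySem.Int.floordiv_eq_ediv_of_pos (by norm_num),
    PySem.Int.floordiv_eq_ediv_of_pos (by positivity), pow_succ]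
  exact Int.ediv_ediv_of_nonneg (by positivity)

theorem pv_push5 (num : Int) (stack : List Char) :
    pvA_push 5 num stack = (PySem.Int.floordiv num (85 ^ 5),
      stack ++ [pvDig num 0, pvDig num 1, pvDig num 2, pvDig num 3, pvDig num 4]) := by
  have h0 : PySem.Int.floordiv num (85 ^ 0) = num := by
    rw [pow_zero, PySem.Int.floordiv_eq_ediv_of_pos (by norm_num), Int.ediv_one]
  have h1 : PySem.Int.floordiv num 85 = PySem.Int.floordiv num (85 ^ 1) := by rw [pow_one]
  have h2 : PySem.Int.floordiv (PySem.Int.floordiv num (85 ^ 1)) 85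
      = PySem.Int.floordiv num (85 ^ 2) := pv_fd_step num 1
  have h3 : PySem.Int.floordiv (PySem.Int.floordiv num (85 ^ 2)) 85
      = PySem.Int.floordiv num (85 ^ 3) := pv_fd_step num 2
  have h4 : PySem.Int.floordiv (PySem.Int.floordiv num (85 ^ 3)) 85
      = PySem.Int.floordiv num (85 ^ 4) := pv_fd_step num 3
  have h5 : PySem.Int.floordiv (PySem.Int.floordiv num (85 ^ 4)) 85
      = PySem.Int.floordiv num (85 ^ 5) := pv_fd_step num 4
  simp only [pvA_push, pvDig, List.append_assoc, List.cons_append, List.nil_append]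
  rw [h0, h1, h2, h3, h4, h5]

theorem pv_encS_eq (num : Int) :
    pvB_encS num = [pvDig num 4, pvDig num 3, pvDig num 2, pvDig num 1, pvDig num 0] := by
  rw [pvB_encS, show PySem.List.pyRange 4 (-1) (-1) = [4, 3, 2, 1, 0] from by decide]
  simp [pvDig]

theorem pv_popAux_spec (k : Nat) : ∀ (result stack : List Char), k ≤ stack.length →
    pvA_popAux k result stack
      = (result ++ stack.reverse.take k, stack.take (stack.length - k)) := by
  induction k with
  | zero =>
    intro result stack _
    simp [pvA_popAux, List.take_length]
  | succ k ih =>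
    intro result stack hk
    have hne : stack ≠ [] := by
      intro h; rw [h] at hk; simp at hk
    rw [pvA_popAux, List.getLast?_eq_some_getLast hne]
    show pvA_popAux k (result ++ [stack.getLast hne]) stack.dropLast = _
    rw [ih _ _ (by simp [List.length_dropLast]; omega)]
    have hsplit : stack = stack.dropLast ++ [stack.getLast hne] :=
      (List.dropLast_append_getLast hne).symm
    simp only [Prod.mk.injEq]
    constructor
    · conv_rhs => rw [hsplit]
      simp [List.reverse_append, List.take_succ_cons, List.append_assoc]
    · rw [List.dropLast_eq_take, List.take_take, List.length_take]
      congr 1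
      omega

-- A's push-then-pop on an empty stack emits the k most-significant digits, stack ends with 5-k digits
theorem pv_emit (num : Int) (k : Nat) (hk : k ≤ 5) (result : List Char) :
    pvA_popAux k result (pvA_push 5 num []).2
      = (result ++ (pvB_encS num).take k, (pvA_push 5 num []).2.take (5 - k)) := by
  rw [pv_push5]
  rw [pv_popAux_spec _ _ _ (by simp; omega)]
  rw [pv_encS_eq]
  simp

-- streaming a full 4-byte group from a fresh accumulator emits one block and resets the state
theorem pv_chunk (c0 c1 c2 c3 : Char) (rest result : List Char) :
    List.foldl pvB_step (result, 0, 0) (c0 :: c1 :: c2 :: c3 :: rest)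
      = List.foldl pvB_step
          (result ++
            (if ((c0.toNat : Int) * 2 ^ 24 + (c1.toNat : Int) * 2 ^ 16
                  + (c2.toNat : Int) * 2 ^ 8 + (c3.toNat : Int)) = 0 then ['z']
             else pvB_enc ((c0.toNat : Int) * 2 ^ 24 + (c1.toNat : Int) * 2 ^ 16
                  + (c2.toNat : Int) * 2 ^ 8 + (c3.toNat : Int)) 5), 0, 0) rest := by
  simp only [List.foldl_cons, pvB_step]
  norm_num
  rw [show (((c0.toNat : Int) * 256 + (c1.toNat : Int)) * 256 + (c2.toNat : Int)) * 256
        + (c3.toNat : Int)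
      = (c0.toNat : Int) * 16777216 + (c1.toNat : Int) * 65536
        + (c2.toNat : Int) * 256 + (c3.toNat : Int) from by ring]

-- streaming a short tail just accumulates
theorem pv_small (cs : List Char) (result : List Char) (h : cs.length < 4) :
    List.foldl pvB_step (result, 0, 0) cs
      = (result, cs.foldl (fun b c => b * 256 + (c.toNat : Int)) 0, cs.length) := by
  match cs with
  | [] => simp
  | [a] => simp [pvB_step]
  | [a, b] => simp [pvB_step]
  | [a, b, c] => simp [pvB_step]
  | a :: b :: c :: d :: t => simp at h; omega

theorem pv_pyRange4_nil (a b : Int) (h : b ≤ a) : PySem.List.pyRange a b 4 = [] := by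
  rw [PySem.List.pyRange_of_pos _ _ (by norm_num)]
  simp [show ¬ a < b by omega]

theorem pv_pyRange4_cons (a b : Int) (h : a < b) :
    PySem.List.pyRange a b 4 = a :: PySem.List.pyRange (a + 4) b 4 := by
  rw [PySem.List.pyRange_of_pos _ _ (by norm_num),
    PySem.List.pyRange_of_pos _ _ (by norm_num)]
  have hm : (if a < b then ((b - a + 4 - 1) / 4).toNat else 0)
      = (if a + 4 < b then ((b - (a + 4) + 4 - 1) / 4).toNat else 0) + 1 := by
    split_ifs <;> omega
  rw [hm, List.range_succ_eq_map]
  simp only [List.map_cons, List.map_map, List.cons.injEq]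
  refine ⟨by push_cast; ring, ?_⟩
  apply List.map_congr_left
  intro k _
  simp only [Function.comp_apply]
  push_cast
  ring

-- the finishing step of B
def pvFinish (st : List Char × Int × Nat) : List Char :=
  if st.2.2 ≠ 0 then st.1 ++ pvB_enc (st.2.1 * 256 ^ (4 - st.2.2)) (st.2.2 + 1) else st.1

theorem pv_main (data : List Char) (f : Nat) : ∀ (i : Nat), data.length - i ≤ f →
    ∀ (result : List Char),
    ((PySem.List.pyRange (i : Int) (data.length : Int) 4).foldl (pvA_step data) (result, [])).1
      = pvFinish (List.foldl pvB_step (result, 0, 0) (data.drop i)) := by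
  induction f with
  | zero =>
    intro i hle result
    rw [pv_pyRange4_nil _ _ (by exact_mod_cast by omega : (data.length : Int) ≤ (i : Int)),
      List.drop_eq_nil_of_le (by omega)]
    simp [pvFinish]
  | succ f ih =>
    intro i hle result
    by_cases hi : i < data.length
    · rw [pv_pyRange4_cons _ _ (by exact_mod_cast hi)]
      simp only [List.foldl_cons]
      have hslice : PySem.List.slice data (some (i : Int)) (some ((i : Int) + 4))
          = (data.drop i).take 4 := by
        rw [show ((i : Int) + 4) = ((i : Int) + ((4 : Nat) : Int)) from by norm_num,
          PySem.List.slice_natCast_add]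
      have hdl : (data.drop i).length = data.length - i := by simp
      rcases hcs : data.drop i with _ | ⟨c0, _ | ⟨c1, _ | ⟨c2, _ | ⟨c3, rest⟩⟩⟩⟩
      · exact absurd (by rw [hcs] at hdl; simpa using hdl.symm) (by omega)
      · -- one trailing byte
        have hL : data.length - i = 1 := by rw [hcs] at hdl; simpa using hdl.symm
        rw [pv_pyRange4_nil ((i : Int) + 4) _ (by omega), List.foldl_nil]
        rw [pv_small [c0] result (by simp)]
        rw [hcs] at hslice
        simp only [pvA_step, hslice]
        norm_num [pvFinish, pvB_enc]
        ring_nf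
        rw [show Int.toNat 2 = 2 from rfl]
        simp [pv_emit _ 2 (by omega)]
      · -- two trailing bytes
        have hL : data.length - i = 2 := by rw [hcs] at hdl; simpa using hdl.symm
        rw [pv_pyRange4_nil ((i : Int) + 4) _ (by omega), List.foldl_nil]
        rw [pv_small [c0, c1] result (by simp)]
        rw [hcs] at hslice
        simp only [pvA_step, hslice]
        norm_num [pvFinish, pvB_enc]
        ring_nf
        rw [show Int.toNat 3 = 3 from rfl]
        simp [pv_emit _ 3 (by omega)]
      · -- three trailing bytes
        have hL : data.length - i = 3 := by rw [hcs] at hdl; simpa using hdl.symm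
        rw [pv_pyRange4_nil ((i : Int) + 4) _ (by omega), List.foldl_nil]
        rw [pv_small [c0, c1, c2] result (by simp)]
        rw [hcs] at hslice
        simp only [pvA_step, hslice]
        norm_num [pvFinish, pvB_enc]
        ring_nf
        rw [show Int.toNat 4 = 4 from rfl]
        simp [pv_emit _ 4 (by omega)]
      · -- full 4-byte block
        have hr : data.drop (i + 4) = rest := by
          have := congrArg (List.drop 4) hcs
          simpa [List.drop_drop, Nat.add_comm] using this
        rw [pv_chunk]
        have hstep : pvA_step data (result, []) (i : Int)
            = (result ++
                (if ((c0.toNat : Int) * 2 ^ 24 + (c1.toNat : Int) * 2 ^ 16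
                      + (c2.toNat : Int) * 2 ^ 8 + (c3.toNat : Int)) = 0 then ['z']
                 else pvB_enc ((c0.toNat : Int) * 2 ^ 24 + (c1.toNat : Int) * 2 ^ 16
                      + (c2.toNat : Int) * 2 ^ 8 + (c3.toNat : Int)) 5), []) := by
          rw [hcs] at hslice
          simp only [pvA_step, hslice]
          norm_num [pvB_enc]
          rw [show Int.toNat 5 = 5 from rfl]
          split_ifs with hz
          · simp
          · simp [pv_emit _ 5 (by omega)]
        rw [hstep]
        have := ih (i + 4) (by omega)
          (result ++
            (if ((c0.toNat : Int) * 2 ^ 24 + (c1.toNat : Int) * 2 ^ 16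
                  + (c2.toNat : Int) * 2 ^ 8 + (c3.toNat : Int)) = 0 then ['z']
             else pvB_enc ((c0.toNat : Int) * 2 ^ 24 + (c1.toNat : Int) * 2 ^ 16
                  + (c2.toNat : Int) * 2 ^ 8 + (c3.toNat : Int)) 5))
        rw [hr] at this
        rw [show ((i : Int) + 4) = (((i + 4 : Nat)) : Int) from by push_cast; ring]
        exact this
    · rw [pv_pyRange4_nil _ _ (by exact_mod_cast by omega : (data.length : Int) ≤ (i : Int)),
        List.drop_eq_nil_of_le (by omega)]
      simp [pvFinish]

-- ===== VERDICT (by name: the statement is the Claim_ definition above) =====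
theorem toAscii85_spec : Claim_equal_toAscii85 := by
  intro data _
  unfold Spec_toAscii85 toAscii85 toAscii85_alt
  have h := pv_main data.toList data.toList.length 0 (by omega) []
  simp only [Nat.cast_zero, List.drop_zero] at h
  rw [h]
  rfl
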